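-- pv_equiv track=rewrite | github.com/avagners/algorithms_and_data-structures | algorithms/sleight_of_hand.py | sleight_of_hand
-- ===== SOURCE A (Python) =====
-- def sleight_of_hand(keys, output_numbers):
--     del_num = set()
--     count_num = {}
--     max_keys = keys * 2
--     for number in output_numbers:
--         if number not in del_num:
--             if number not in count_num.keys():
--                 count_num[number] = 1
--             else:
--                 count_num[number] += 1
--             if count_num[number] > max_keys:
--                 del_num.add(number)
--                 del count_num[number]
--     return len(count_num)
-- ===== SOURCE B (Python) =====
-- def sleight_of_hand(keys, output_numbers):
--     # Sort-then-scan: after sorting, equal numbers form contiguous runs;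
--     # count the runs whose length is at most keys*2.
--     limit = keys * 2
--     total = 0
--     run_len = 0
--     prev = None
--     for x in sorted(output_numbers):
--         if run_len > 0 and x == prev:
--             run_len += 1
--         else:
--             if 0 < run_len <= limit:
--                 total += 1
--             run_len = 1
--             prev = x
--     if 0 < run_len <= limit:
--         total += 1
--     return total
-- ===== Notes on version B (the rewrite author's own statement) =====
-- stated objective: alternative
-- what changed: Replaced A's hash-based single pass with a del-set and mid-stream dict deletions by sort-then-scan: sort the list so equal numbers form contiguous runs, then one linear scan counts the runs whose length is at most keys*2; no dictionary or set is maintained at all.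
import Mathlib
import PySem

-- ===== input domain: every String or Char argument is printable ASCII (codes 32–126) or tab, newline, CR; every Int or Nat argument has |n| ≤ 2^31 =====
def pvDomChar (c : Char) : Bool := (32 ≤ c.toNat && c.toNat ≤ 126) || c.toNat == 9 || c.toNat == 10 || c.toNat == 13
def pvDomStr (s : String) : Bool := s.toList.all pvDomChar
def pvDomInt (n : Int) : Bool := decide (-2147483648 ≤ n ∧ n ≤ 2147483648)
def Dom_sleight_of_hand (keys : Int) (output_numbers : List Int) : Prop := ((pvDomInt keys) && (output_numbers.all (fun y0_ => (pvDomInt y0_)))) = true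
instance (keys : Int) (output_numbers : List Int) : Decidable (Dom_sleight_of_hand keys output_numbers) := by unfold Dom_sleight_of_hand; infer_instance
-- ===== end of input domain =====

-- B replaces A's hash-based pass (del-set + mid-stream dict deletions) by sort-then-scan:
-- sort, then count contiguous runs of length ≤ keys*2 (objective: alternative algorithm).

-- ===== PORT A =====
-- the body of A's for-loop, one transliterated step (st = (del_num, count_num))
def pvStepA (max_keys : Int) (st : PySem.Set Int × PySem.Dict Int Int) (number : Int) :
    PySem.Set Int × PySem.Dict Int Int :=
  if PySem.Set.contains st.1 number then st
  else
    let cnt :=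
      if st.2.contains number then st.2.insert number (st.2.getD number 0 + 1)
      else st.2.insert number 1
    if max_keys < cnt.getD number 0 then (PySem.Set.add st.1 number, cnt.erase number)
    else (st.1, cnt)

def sleight_of_hand (keys : Int) (output_numbers : List Int) : Int :=
  let max_keys := keys * 2
  let st := output_numbers.foldl (pvStepA max_keys) (PySem.Set.empty, PySem.Dict.empty)
  (PySem.Dict.size st.2 : Int)

-- ===== PORT B =====
-- the body of B's for-loop over the sorted list, one transliterated step (st = (total, run_len, prev))
def pvStepB (limit : Int) (st : Int × Int × Option Int) (x : Int) : Int × Int × Option Int :=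
  if 0 < st.2.1 ∧ some x = st.2.2 then (st.1, st.2.1 + 1, st.2.2)
  else ((if 0 < st.2.1 ∧ st.2.1 ≤ limit then st.1 + 1 else st.1), 1, some x)

def sleight_of_hand_alt (keys : Int) (output_numbers : List Int) : Int :=
  let limit := keys * 2
  let st := (PySem.List.sorted output_numbers (fun x => x) false).foldl (pvStepB limit) (0, 0, none)
  if 0 < st.2.1 ∧ st.2.1 ≤ limit then st.1 + 1 else st.1

-- ===== PRECONDITION & SPEC =====
def Spec_sleight_of_hand (keys : Int) (output_numbers : List Int) (out : Int) : Prop := out = sleight_of_hand_alt keys output_numbers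
instance (keys : Int) (output_numbers : List Int) (out : Int) : Decidable (Spec_sleight_of_hand keys output_numbers out) := by unfold Spec_sleight_of_hand; infer_instance

-- ===== CLAIM (what is proved, stated in full; the proofs are below) =====
def Claim_equal_sleight_of_hand : Prop := ∀ (keys : Int) (output_numbers : List Int), Dom_sleight_of_hand keys output_numbers → Spec_sleight_of_hand keys output_numbers (sleight_of_hand keys output_numbers)

-- ===== LEMMAS AND PROOFS =====

-- Dict.erase facts (not in the PySem lemma book)
theorem pv_find?_filter_erase (k k' : Int) (items : List (Int × Int)) :
    (items.filter (fun p => !(p.1 == k))).find? (fun p => p.1 == k')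
      = if k' = k then none else items.find? (fun p => p.1 == k') := by
  induction items with
  | nil => simp only [List.filter_nil, List.find?_nil]; split <;> rfl
  | cons p rest ih =>
    by_cases hpk : p.1 = k
    · by_cases hk' : k' = k
      · simp_all
      · simp_all [Ne.symm hk']
    · by_cases hpk' : p.1 = k'
      · have hkk : ¬ k' = k := fun h => hpk (hpk'.trans h)
        simp_all
      · simp_all

theorem pv_get?_erase (d : PySem.Dict Int Int) (k k' : Int) :
    (d.erase k).get? k' = if k' = k then none else d.get? k' := by
  obtain ⟨items⟩ := d
  simp only [PySem.Dict.erase, PySem.Dict.get?, pv_find?_filter_erase]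
  split <;> rfl

theorem pv_keys_erase_sublist (d : PySem.Dict Int Int) (k : Int) :
    (d.erase k).keys.Sublist d.keys := by
  simpa [PySem.Dict.erase, PySem.Dict.keys] using
    (List.filter_sublist (l := d.items) (p := fun p => !(p.1 == k))).map (·.1)

-- A's loop invariant over a processed prefix l: del_num holds exactly the numbers whose
-- count in l exceeds m, and count_num maps k to l.count k exactly when 1 ≤ l.count k ≤ m.
def pvInv (m : Int) (l : List Int) (st : PySem.Set Int × PySem.Dict Int Int) : Prop :=
  (∀ k : Int, k ∈ st.1 ↔ k ∈ l ∧ m < (l.count k : Int)) ∧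
  st.2.keys.Nodup ∧
  (∀ k : Int, st.2.get? k = if k ∈ l ∧ (l.count k : Int) ≤ m then some (l.count k : Int) else none)

theorem pv_invariant (m : Int) (l : List Int) :
    pvInv m l (l.foldl (pvStepA m) (PySem.Set.empty, PySem.Dict.empty)) := by
  induction l using List.reverseRecOn with
  | nil =>
    refine ⟨by simp [PySem.Set.empty], by simp [PySem.Dict.empty, PySem.Dict.keys], ?_⟩
    intro k; simp [PySem.Dict.empty, PySem.Dict.get?]
  | append_singleton l x ih =>
    obtain ⟨hdel, hnd, hget⟩ := ih
    rw [List.foldl_append, List.foldl_cons, List.foldl_nil]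
    set st := l.foldl (pvStepA m) (PySem.Set.empty, PySem.Dict.empty) with hst
    have hcx : ((l ++ [x]).count x : Int) = (l.count x : Int) + 1 := by
      simp [List.count_append]
    have hmemx : x ∈ l ++ [x] := List.mem_append.mpr (Or.inr (List.mem_singleton_self x))
    by_cases hx : x ∈ l ∧ m < (l.count x : Int)
    · -- number already deleted: state unchanged
      have hc : PySem.Set.contains st.1 x = true :=
        (PySem.Set.contains_iff st.1 x).mpr ((hdel x).mpr hx)
      simp only [pvStepA, hc, if_true]
      have h2 := hx.2
      refine ⟨?_, hnd, ?_⟩ <;> intro k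
      · by_cases hk : k = x
        · rw [hk]
          exact iff_of_true ((hdel x).mpr hx) ⟨hmemx, by rw [hcx]; omega⟩
        · simp [hdel k, hk, List.count_append, Ne.symm hk]
      · rw [hget k]
        by_cases hk : k = x
        · rw [hk]
          rw [if_neg (by rintro ⟨-, hle⟩; omega),
            if_neg (by rintro ⟨-, hle⟩; rw [hcx] at hle; omega)]
        · simp [hk, List.count_append, Ne.symm hk]
    · -- number not deleted yet
      have hc : PySem.Set.contains st.1 x = false := by
        rcases Bool.eq_false_or_eq_true (PySem.Set.contains st.1 x) with h | h
        · exact absurd ((hdel x).mp ((PySem.Set.contains_iff st.1 x).mp h)) hx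
        · exact h
      have hcnt : (if st.2.contains x then st.2.insert x (st.2.getD x 0 + 1)
            else st.2.insert x 1) = st.2.insert x ((l.count x : Int) + 1) := by
        by_cases hxl : x ∈ l
        · have hle : (l.count x : Int) ≤ m := by
            by_contra hgt; exact hx ⟨hxl, by omega⟩
          have hcon : st.2.contains x = true := by
            rw [PySem.Dict.contains_eq_isSome_get?, hget x, if_pos ⟨hxl, hle⟩]; rfl
          have hgd : st.2.getD x 0 = (l.count x : Int) := by
            rw [PySem.Dict.getD_eq_get?_getD, hget x, if_pos ⟨hxl, hle⟩]; rfl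
          rw [if_pos hcon, hgd]
        · have hcon : st.2.contains x = false := by
            rw [PySem.Dict.contains_eq_isSome_get?, hget x, if_neg (by simp [hxl])]; rfl
          rw [if_neg (by simp [hcon]), List.count_eq_zero_of_not_mem hxl]
          norm_num
      simp only [pvStepA, hc, if_false, Bool.false_eq_true, hcnt]
      have hgdx : (st.2.insert x ((l.count x : Int) + 1)).getD x 0 = (l.count x : Int) + 1 := by
        rw [PySem.Dict.getD_eq_get?_getD, PySem.Dict.get?_insert_self]; rfl
      rw [hgdx]
      by_cases hbr : m < (l.count x : Int) + 1
      · rw [if_pos hbr]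
        refine ⟨?_, ?_, ?_⟩
        · intro k
          rw [PySem.Set.mem_add]
          by_cases hk : k = x
          · rw [hk]
            exact iff_of_true (Or.inr rfl) ⟨hmemx, by rw [hcx]; omega⟩
          · simp [hdel k, hk, List.count_append, Ne.symm hk]
        · exact ((pv_keys_erase_sublist _ x).nodup (PySem.Dict.nodup_keys_insert _ _ _ hnd))
        · intro k
          rw [pv_get?_erase]
          by_cases hk : k = x
          · rw [hk]
            rw [if_pos rfl, if_neg (by rintro ⟨-, hle⟩; rw [hcx] at hle; omega)]
          · rw [if_neg hk, PySem.Dict.get?_insert_of_ne _ _ hk, hget k]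
            simp [hk, List.count_append, Ne.symm hk]
      · rw [if_neg hbr]
        refine ⟨?_, PySem.Dict.nodup_keys_insert _ _ _ hnd, ?_⟩ <;> intro k
        · by_cases hk : k = x
          · rw [hk]
            refine iff_of_false (fun h => hx ((hdel x).mp h)) ?_
            rintro ⟨-, hmc⟩
            rw [hcx] at hmc; omega
          · simp [hdel k, hk, List.count_append, Ne.symm hk]
        · by_cases hk : k = x
          · rw [hk]
            rw [PySem.Dict.get?_insert_self,
              if_pos ⟨hmemx, by rw [hcx]; omega⟩, hcx]
          · rw [PySem.Dict.get?_insert_of_ne _ _ hk, hget k]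
            simp [hk, List.count_append, Ne.symm hk]

-- ===== B-side: the run scan over a sorted list =====

-- finalisation of B's state
def pvFin (m : Int) (st : Int × Int × Option Int) : Int :=
  if 0 < st.2.1 ∧ st.2.1 ≤ m then st.1 + 1 else st.1

-- the value both programs compute: number of distinct elements with count ≤ m
def pvN (m : Int) (s : List Int) : Int :=
  (((PySem.Set.ofList s).countP (fun k => decide ((s.count k : Int) ≤ m)) : Nat) : Int)

theorem pv_foldB_run (m : Int) (a : Int) (k : Nat) :
    ∀ tot rl, 0 < rl →
      (List.replicate k a).foldl (pvStepB m) (tot, rl, some a) = (tot, rl + k, some a) := by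
  induction k with
  | zero => intro tot rl _; simp
  | succ k ih =>
    intro tot rl hrl
    rw [List.replicate_succ, List.foldl_cons]
    have : pvStepB m (tot, rl, some a) a = (tot, rl + 1, some a) := by
      simp [pvStepB, hrl]
    rw [this, ih tot (rl + 1) (by omega)]
    simp; omega

theorem pv_scan (m : Int) : ∀ (n : Nat) (s : List Int), s.length ≤ n →
    s.Pairwise (· ≤ ·) → ∀ tot : Int,
    pvFin m (s.foldl (pvStepB m) (tot, 0, none)) = tot + pvN m s := by
  intro n
  induction n with
  | zero =>
    intro s hs _ tot
    have : s = [] := List.eq_nil_of_length_eq_zero (Nat.le_zero.mp hs)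
    subst this
    have hnil : PySem.Set.ofList ([] : List Int) = [] := rfl
    simp [pvFin, pvN, hnil]
  | succ n ih =>
    intro s hs hsort tot
    rcases s with _ | ⟨a, t⟩
    · have hnil : PySem.Set.ofList ([] : List Int) = [] := rfl
      simp [pvFin, pvN, hnil]
    · -- split off the run of a's at the head
      have hsort' := hsort
      rw [List.pairwise_cons] at hsort'
      obtain ⟨hale, htp⟩ := hsort'
      set s₁ := t.takeWhile (fun x => x == a) with hs₁
      set s₂ := t.dropWhile (fun x => x == a) with hs₂
      have hts : t = s₁ ++ s₂ := (List.takeWhile_append_dropWhile).symm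
      have hs₁a : s₁ = List.replicate s₁.length a := by
        apply List.eq_replicate_of_mem
        intro b hb
        have := List.mem_takeWhile_imp hb
        simpa using this
      have hp₂0 : s₂.Pairwise (· ≤ ·) :=
        List.Pairwise.sublist (List.dropWhile_sublist _) htp
      -- every element of s₂ differs from a
      have hs₂ne : ∀ x ∈ s₂, x ≠ a := by
        intro x hx
        match hs2d : s₂, hx, hp₂0, hs₂, hts with
        | b :: t₂, hx, hp₂0, hs₂, hts =>
          have hbne : (b == a) = false := by
            have := List.head?_dropWhile_not (p := fun x => x == a) t
            rw [← hs₂] at this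
            simpa using this
          have hbne' : b ≠ a := by simpa using hbne
          have hba : a ≤ b := hale b (by
            rw [hts]
            exact List.mem_append.mpr (Or.inr (List.mem_cons_self)))
          have halt : a < b := lt_of_le_of_ne hba (Ne.symm hbne')
          rcases List.mem_cons.mp hx with h | h
          · subst h; exact hbne'
          · rw [List.pairwise_cons] at hp₂0
            have hbx : b ≤ x := hp₂0.1 x h
            exact fun hxa => absurd (hxa ▸ hbx) (not_le.mpr halt)
      have has₂ : a ∉ s₂ := fun h => (hs₂ne a h) rfl
      have hp₂ : s₂.Pairwise (· ≤ ·) := hp₂0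
      set c : Nat := s₁.length + 1 with hc
      have hrep : a :: t = List.replicate c a ++ s₂ := by
        rw [hts, hs₁a, hc]
        simp [List.replicate_succ]
      have hcount_a : (a :: t).count a = c := by
        rw [hrep, List.count_append, List.count_replicate,
          List.count_eq_zero_of_not_mem has₂]
        simp
      have hcount_k : ∀ k, k ≠ a → (a :: t).count k = s₂.count k := by
        intro k hk
        rw [hrep, List.count_append, List.count_replicate, if_neg (by simpa using hk.symm)]
        simp
      -- fold over the leading run
      have hfold1 : (a :: t).foldl (pvStepB m) (tot, 0, none) =
          s₂.foldl (pvStepB m) (tot, (c : Int), some a) := by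
        rw [hrep]
        have hc1 : List.replicate c a = a :: List.replicate s₁.length a := by
          rw [hc, List.replicate_succ]
        rw [hc1, List.foldl_append, List.foldl_cons]
        have hstep0 : pvStepB m (tot, 0, none) a = (tot, 1, some a) := by
          simp [pvStepB]
        rw [hstep0, pv_foldB_run m a s₁.length tot 1 (by omega)]
        have hcc : (1 : Int) + (s₁.length : Int) = (c : Int) := by
          rw [hc]; push_cast; ring
        rw [hcc]
      -- the set-count identity
      have hN : pvN m (a :: t) = (if (c : Int) ≤ m then 1 else 0) + pvN m s₂ := by
        have hnodupA : (a :: PySem.Set.ofList s₂).Nodup := by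
          refine List.nodup_cons.mpr ⟨?_, PySem.Set.nodup_ofList s₂⟩
          rw [PySem.Set.mem_ofList]; exact has₂
        have hperm : (PySem.Set.ofList (a :: t)).Perm (a :: PySem.Set.ofList s₂) := by
          rw [List.perm_ext_iff_of_nodup (PySem.Set.nodup_ofList (a :: t)) hnodupA]
          intro k
          have hmem_s₁ : ∀ x ∈ s₁, x = a := fun x hx => by
            rw [hs₁a] at hx; exact (List.mem_replicate.mp hx).2
          simp only [List.mem_cons, PySem.Set.mem_ofList]
          constructor
          · rintro (h | h)
            · exact Or.inl h
            · rcases List.mem_append.mp (hts ▸ h) with h1 | h2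
              · exact Or.inl (hmem_s₁ _ h1)
              · exact Or.inr h2
          · rintro (h | h)
            · exact Or.inl h
            · exact Or.inr (by rw [hts]; exact List.mem_append.mpr (Or.inr h))
        unfold pvN
        rw [hperm.countP_eq, List.countP_cons]
        have hcong : (PySem.Set.ofList s₂).countP (fun k => decide (((a :: t).count k : Int) ≤ m))
            = (PySem.Set.ofList s₂).countP (fun k => decide ((s₂.count k : Int) ≤ m)) := by
          apply List.countP_congr
          intro k hk
          rw [hcount_k k (hs₂ne k ((PySem.Set.mem_ofList s₂ k).mp hk))]
        rw [hcong, hcount_a]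
        by_cases hcm : ((c : Nat) : Int) ≤ m
        · rw [if_pos hcm]
          simp only [hcm, decide_true, if_true]
          push_cast; ring
        · rw [if_neg hcm]
          simp only [hcm, decide_false]
          push_cast; ring
      rw [hfold1, hN]
      -- fold over s₂
      have hcpos : (0 : Int) < (c : Int) := by positivity
      match hs2d : s₂, hs₂ne, hp₂, hrep with
      | [], hs₂ne, hp₂, hrep =>
        have hnil : PySem.Set.ofList ([] : List Int) = [] := rfl
        simp only [List.foldl_nil, pvFin, pvN, hnil, List.countP_nil]
        split <;> rename_i h
        · rw [if_pos (by omega)]; push_cast; ring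
        · rw [if_neg (by omega)]; push_cast; ring
      | b :: t₂, hs₂ne, hp₂, hrep =>
        have hbne : b ≠ a := hs₂ne b (List.mem_cons_self)
        have hstepb : pvStepB m (tot, (c : Int), some a) b
            = ((if 0 < (c : Int) ∧ (c : Int) ≤ m then tot + 1 else tot), 1, some b) := by
          simp [pvStepB, hbne]
        have hstepb0 : pvStepB m ((if 0 < (c : Int) ∧ (c : Int) ≤ m then tot + 1 else tot), 0, none) b
            = ((if 0 < (c : Int) ∧ (c : Int) ≤ m then tot + 1 else tot), 1, some b) := by
          simp [pvStepB]
        rw [List.foldl_cons, hstepb, ← hstepb0, ← List.foldl_cons]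
        have hlen : (b :: t₂).length ≤ n := by
          have hlens : (a :: t).length = c + (b :: t₂).length := by rw [hrep]; simp
          omega
        rw [ih (b :: t₂) hlen hp₂]
        split <;> rename_i h
        · rw [if_pos (by omega)]; ring
        · rw [if_neg (by omega)]; ring

-- ===== VERDICT (by name: the statement is the Claim_ definition above) =====
theorem sleight_of_hand_spec : Claim_equal_sleight_of_hand := by
  intro keys l _
  unfold Spec_sleight_of_hand sleight_of_hand sleight_of_hand_alt
  simp only []
  set m := keys * 2 with hm
  obtain ⟨hdel, hnd, hget⟩ := pv_invariant m l
  set st := l.foldl (pvStepA m) (PySem.Set.empty, PySem.Dict.empty) with hst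
  -- B's value: runs counted over the sorted list = distinct elements with count ≤ m
  set s := PySem.List.sorted l (fun x => x) false with hsrt
  have hperm_s : s.Perm l := PySem.List.sorted_perm l (fun x => x) false
  have hsorted : s.Pairwise (· ≤ ·) := by
    simpa using PySem.List.sorted_pairwise l (fun x => x)
  have hB : pvFin m (s.foldl (pvStepB m) (0, 0, none)) = pvN m s :=
    by rw [pv_scan m s.length s le_rfl hsorted 0]; ring
  -- A's value: the surviving keys
  have hkeys : st.2.size = st.2.keys.length := by
    simp [PySem.Dict.size, PySem.Dict.keys]
  have hpermA : st.2.keys.Perm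
      ((PySem.Set.ofList l).filter (fun k => decide ((l.count k : Int) ≤ m))) := by
    rw [List.perm_ext_iff_of_nodup hnd ((PySem.Set.nodup_ofList l).filter _)]
    intro k
    rw [List.mem_filter]
    constructor
    · intro hk
      have : st.2.get? k ≠ none := by
        rw [Ne, PySem.Dict.get?_eq_none_iff_not_mem_keys]; simp [hk]
      rw [hget k] at this
      by_cases h : k ∈ l ∧ (l.count k : Int) ≤ m
      · exact ⟨by simpa [PySem.Set.mem_ofList] using h.1, by simp [h.2]⟩
      · simp [h] at this
    · intro ⟨h1, h2⟩
      have h1' : k ∈ l := by simpa [PySem.Set.mem_ofList] using h1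
      have : st.2.get? k ≠ none := by
        rw [hget k, if_pos ⟨h1', by simpa using h2⟩]; simp
      rw [Ne, PySem.Dict.get?_eq_none_iff_not_mem_keys] at this
      simpa using this
  -- glue: pvN over the sorted list equals the filter length over l
  have hNs : pvN m s
      = (((PySem.Set.ofList l).filter (fun k => decide ((l.count k : Int) ≤ m))).length : Int) := by
    unfold pvN
    have hmem : ∀ k : Int, k ∈ PySem.Set.ofList s ↔ k ∈ PySem.Set.ofList l := by
      intro k
      rw [PySem.Set.mem_ofList, PySem.Set.mem_ofList]
      exact hperm_s.mem_iff
    have hpermSet : (PySem.Set.ofList s).Perm (PySem.Set.ofList l) := by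
      rw [List.perm_ext_iff_of_nodup (PySem.Set.nodup_ofList s) (PySem.Set.nodup_ofList l)]
      exact hmem
    rw [hpermSet.countP_eq]
    have hcong : (PySem.Set.ofList l).countP (fun k => decide ((s.count k : Int) ≤ m))
        = (PySem.Set.ofList l).countP (fun k => decide ((l.count k : Int) ≤ m)) := by
      apply List.countP_congr
      intro k _
      rw [hperm_s.count_eq]
    rw [hcong, List.countP_eq_length_filter]
  rw [hkeys, hpermA.length_eq]
  show (((PySem.Set.ofList l).filter _).length : Int)
      = pvFin m (s.foldl (pvStepB m) (0, 0, none))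
  rw [hB, hNs]
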